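-- pv_equiv track=rewrite | github.com/Huey-J/Algorithm_Practice | 파이썬/프로그래머스 Lv1/대소문자 - 이상한 문자 만들기 (upper lower).py | solution
-- ===== SOURCE A (Python) =====
-- def solution(s):
--     answer = ""
--     s_list = list(s.split(' '))
--
--     for str in s_list:
--         for i in range(len(str)):
--             if i % 2 == 0:
--                 answer += str[i].upper()
--             else:
--                 answer += str[i].lower()
--         answer += ' '
--
--     return answer[:-1]
-- ===== SOURCE B (Python) =====
-- def solution(s):
--     out = []
--     k = 0
--     for ch in s:
--         if ch == ' ':
--             out.append(ch)
--             k = 0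
--         else:
--             out.append(ch.upper() if k % 2 == 0 else ch.lower())
--             k += 1
--     return ''.join(out)
-- ===== Notes on version B (the rewrite author's own statement) =====
-- stated objective: simpler
-- what changed: Replaced split(' ') plus a nested index loop with a single flat pass over the characters that keeps an in-word position counter, reset on each space, so no word list is built and no trailing-space trim is needed.
import Mathlib
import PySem

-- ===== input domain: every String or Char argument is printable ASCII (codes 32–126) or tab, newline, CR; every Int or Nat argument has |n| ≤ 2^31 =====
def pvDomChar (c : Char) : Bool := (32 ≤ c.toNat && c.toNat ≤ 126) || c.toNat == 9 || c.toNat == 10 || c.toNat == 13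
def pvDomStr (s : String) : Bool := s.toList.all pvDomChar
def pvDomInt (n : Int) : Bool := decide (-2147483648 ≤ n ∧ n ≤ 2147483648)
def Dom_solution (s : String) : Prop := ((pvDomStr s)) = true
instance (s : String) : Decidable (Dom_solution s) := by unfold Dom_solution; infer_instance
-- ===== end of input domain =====

-- B replaces split(' ')+nested index loop by one flat pass with a per-word position counter (same return value; simpler decomposition).


-- ===== PORT A =====
-- inner loop: for i in range(len(str)): answer += str[i].upper() / str[i].lower()
-- (.upper()/.lower() on a one-character string = upperChar/lowerChar, exact on ASCII)
def pvWordStep (ans : List Char) (w : List Char) : List Char :=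
  (PySem.List.pyRange 0 (PySem.List.len w) 1).foldl
    (fun a i => if PySem.Int.mod i 2 = 0
      then a ++ [PySem.Chars.upperChar (PySem.List.pyGetD w i ' ')]
      else a ++ [PySem.Chars.lowerChar (PySem.List.pyGetD w i ' ')]) ans

def solution (s : String) : String :=
  let sList := PySem.Chars.splitOn s.toList [' ']
  let answer := sList.foldl (fun ans w => pvWordStep ans w ++ [' ']) []
  String.ofList (PySem.List.slice answer none (some (-1)))   -- answer[:-1]

-- ===== PORT B =====
def solution_alt (s : String) : String :=
  String.ofList (s.toList.foldl
    (fun (st : List Char × Nat) c =>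
      if c = ' ' then (st.1 ++ [c], 0)
      else (st.1 ++ [if st.2 % 2 = 0 then PySem.Chars.upperChar c else PySem.Chars.lowerChar c],
            st.2 + 1))
    ([], 0)).1

-- ===== PRECONDITION & SPEC =====
def Spec_solution (s : String) (out : String) : Prop := out = solution_alt s
instance (s : String) (out : String) : Decidable (Spec_solution s out) := by unfold Spec_solution; infer_instance

-- ===== CLAIM (what is proved, stated in full; the proofs are below) =====
def Claim_equal_solution : Prop := ∀ (s : String), Dom_solution s → Spec_solution s (solution s)

-- ===== LEMMAS AND PROOFS =====

-- split on a single space, written structurally (cur = current piece so far)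
def pvSplit1 (cur : List Char) : List Char → List (List Char)
  | [] => [cur]
  | c :: cs => if c = ' ' then cur :: pvSplit1 [] cs else pvSplit1 (cur ++ [c]) cs

-- A's per-word output, written structurally with a parity counter
def pvProcW : List Char → Nat → List Char
  | [], _ => []
  | c :: cs, k =>
      (if k % 2 = 0 then PySem.Chars.upperChar c else PySem.Chars.lowerChar c) :: pvProcW cs (k + 1)

-- B's output from counter state k
def pvBout : Nat → List Char → List Char
  | _, [] => []
  | k, c :: cs => if c = ' ' then ' ' :: pvBout 0 cs
      else (if k % 2 = 0 then PySem.Chars.upperChar c else PySem.Chars.lowerChar c) :: pvBout (k + 1) cs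

lemma go_cons (f : Nat) (c : Char) (cs cur : List Char) (acc : List (List Char)) :
    PySem.Chars.splitOn.go [' '] (f + 1) (c :: cs) cur acc =
      if c = ' ' then PySem.Chars.splitOn.go [' '] f cs [] (cur.reverse :: acc)
      else PySem.Chars.splitOn.go [' '] f cs (c :: cur) acc := by
  rw [PySem.Chars.splitOn.go]
  by_cases hc : c = ' '
  · subst hc
    rw [if_pos (by simp), if_pos rfl]
    simp only [List.length_cons, List.length_nil, List.drop_succ_cons, List.drop_zero]
  · rw [if_neg ?_, if_neg hc]
    show ¬ ((' ' == c && List.isPrefixOf [] cs) = true)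
    simp
    exact fun h => hc h.symm

lemma go_space (fuel : Nat) : ∀ (l cur : List Char) (acc : List (List Char)),
    l.length < fuel →
    PySem.Chars.splitOn.go [' '] fuel l cur acc = acc.reverse ++ pvSplit1 cur.reverse l := by
  induction fuel with
  | zero => intro l cur acc h; omega
  | succ f ih =>
    intro l cur acc h
    cases l with
    | nil => simp [PySem.Chars.splitOn.go, pvSplit1]
    | cons c cs =>
      rw [go_cons]
      by_cases hc : c = ' '
      · subst hc
        rw [if_pos rfl, ih cs [] (cur.reverse :: acc) (by simpa using Nat.lt_of_succ_lt_succ h)]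
        simp [pvSplit1]
      · rw [if_neg hc, ih cs (c :: cur) acc (by simpa using Nat.lt_of_succ_lt_succ h)]
        simp [pvSplit1, hc]

lemma splitOn_space (l : List Char) :
    PySem.Chars.splitOn l [' '] = pvSplit1 [] l := by
  show PySem.Chars.splitOn.go [' '] (l.length + 1) l [] [] = pvSplit1 [] l
  rw [go_space (l.length + 1) l [] [] (by omega)]; rfl

-- A's inner index loop computes a map over the index range
lemma wordFold_range (w : List Char) : ∀ (n : Nat) (ans : List Char),
    (PySem.List.pyRange 0 (n : Int) 1).foldl
      (fun a i => if PySem.Int.mod i 2 = 0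
        then a ++ [PySem.Chars.upperChar (PySem.List.pyGetD w i ' ')]
        else a ++ [PySem.Chars.lowerChar (PySem.List.pyGetD w i ' ')]) ans
      = ans ++ (List.range n).map (fun i => if i % 2 = 0
          then PySem.Chars.upperChar (w.getD i ' ') else PySem.Chars.lowerChar (w.getD i ' ')) := by
  intro n
  induction n with
  | zero => intro ans; simp [PySem.List.pyRange_one_eq_nil]
  | succ m ih =>
    intro ans
    have hc : ((m + 1 : Nat) : Int) = (m : Int) + 1 := by push_cast; ring
    rw [hc, PySem.List.pyRange_one_succ_right (by positivity), List.foldl_append, ih]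
    have hmod : (PySem.Int.mod (m : Int) 2 = 0) ↔ m % 2 = 0 := by
      rw [PySem.Int.mod_eq_emod_of_pos (by norm_num)]; omega
    have hget : PySem.List.pyGetD w (m : Int) ' ' = w.getD m ' ' := by
      simp [PySem.List.pyGetD_natCast]
    simp only [List.foldl_cons, List.foldl_nil, hget, List.range_succ, List.map_append,
      List.map_cons, List.map_nil, List.append_assoc]
    by_cases hm : m % 2 = 0
    · rw [if_pos (hmod.mpr hm), if_pos hm]
    · rw [if_neg (fun h => hm (hmod.mp h)), if_neg hm]

-- B's per-word processing as the same map, with parity offset k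
lemma procW_eq_map : ∀ (w : List Char) (k : Nat),
    pvProcW w k = (List.range w.length).map (fun i => if (k + i) % 2 = 0
      then PySem.Chars.upperChar (w.getD i ' ') else PySem.Chars.lowerChar (w.getD i ' ')) := by
  intro w
  induction w with
  | nil => intro k; simp [pvProcW]
  | cons c cs ih =>
    intro k
    rw [pvProcW, ih (k + 1)]
    simp only [List.length_cons, List.range_succ_eq_map, List.map_cons, List.map_map,
      Nat.add_zero, List.getD_cons_zero]
    congr 1
    apply List.map_congr_left
    intro i _
    have h : k + 1 + i = k + (i + 1) := by omega
    simp [Function.comp, h]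

lemma wordStep_eq (w ans : List Char) : pvWordStep ans w = ans ++ pvProcW w 0 := by
  rw [pvWordStep, procW_eq_map]
  have : PySem.List.len w = ((w.length : Nat) : Int) := by simp [PySem.List.len_eq]
  rw [this, wordFold_range w w.length ans]
  simp

lemma procW_append (u v : List Char) : ∀ k, pvProcW (u ++ v) k = pvProcW u k ++ pvProcW v (k + u.length) := by
  induction u with
  | nil => intro k; simp [pvProcW]
  | cons c cs ih =>
    intro k
    simp only [List.cons_append, pvProcW, ih (k + 1), List.length_cons]
    have h : k + 1 + cs.length = k + (cs.length + 1) := by omega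
    rw [h]

-- the A-side fold over pieces flattens
lemma foldA_flat : ∀ (ps : List (List Char)) (ans : List Char),
    ps.foldl (fun ans w => pvWordStep ans w ++ [' ']) ans
      = ans ++ ps.flatMap (fun w => pvProcW w 0 ++ [' ']) := by
  intro ps
  induction ps with
  | nil => intro ans; simp
  | cons p ps ih => intro ans; rw [List.foldl_cons, ih, wordStep_eq]; simp [List.flatMap_cons]

lemma flat_ne : ∀ (l cur : List Char),
    (pvSplit1 cur l).flatMap (fun w => pvProcW w 0 ++ [' ']) ≠ [] := by
  intro l
  induction l with
  | nil => intro cur; simp [pvSplit1]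
  | cons c cs ih =>
    intro cur
    by_cases hc : c = ' '
    · simp [pvSplit1, hc, List.flatMap_cons]
    · simpa [pvSplit1, hc] using ih (cur ++ [c])

lemma main_bridge : ∀ (l cur : List Char),
    ((pvSplit1 cur l).flatMap (fun w => pvProcW w 0 ++ [' '])).dropLast
      = pvProcW cur 0 ++ pvBout cur.length l := by
  intro l
  induction l with
  | nil =>
    intro cur
    simp [pvSplit1, pvBout, List.flatMap_cons]
  | cons c cs ih =>
    intro cur
    by_cases hc : c = ' '
    · subst hc
      simp only [pvSplit1, if_true, List.flatMap_cons, pvBout]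
      rw [List.dropLast_append_of_ne_nil (flat_ne cs [])]
      have := ih []
      simp only [pvProcW, List.length_nil] at this
      rw [this]
      simp
    · simp only [pvSplit1, hc, if_false, pvBout]
      rw [ih (cur ++ [c]), procW_append]
      simp [pvProcW, List.length_append]

-- B's fold, first component
lemma bfold_fst : ∀ (l acc : List Char) (k : Nat),
    (l.foldl (fun (st : List Char × Nat) c =>
      if c = ' ' then (st.1 ++ [c], 0)
      else (st.1 ++ [if st.2 % 2 = 0 then PySem.Chars.upperChar c else PySem.Chars.lowerChar c],
            st.2 + 1)) (acc, k)).1 = acc ++ pvBout k l := by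
  intro l
  induction l with
  | nil => intro acc k; simp [pvBout]
  | cons c cs ih =>
    intro acc k
    by_cases hc : c = ' '
    · subst hc; simp only [List.foldl_cons, if_true, ih, pvBout]; simp
    · simp only [List.foldl_cons, if_neg hc, ih, pvBout]
      simp

-- ===== VERDICT (by name: the statement is the Claim_ definition above) =====
theorem solution_spec : Claim_equal_solution := by
  intro s _
  show solution s = solution_alt s
  dsimp only [solution, solution_alt]
  rw [splitOn_space, foldA_flat, bfold_fst]
  rw [PySem.List.slice_to_neg_one]
  have := main_bridge s.toList []
  simp only [pvProcW, List.length_nil] at this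
  simp [this]
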